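-- pv_equiv track=rewrite | github.com/nikhibdg/Brown-Clustering | brown_clustering.py | replace_by_unk
-- ===== SOURCE A (Python) =====
-- import string
--
-- def replace_by_unk(data):
--
--     word_frequency = {}
--     all_data = []
--     punctuation = string.punctuation
--     punctuation = punctuation + "''" + "``" + "--"
--
--     for line in data:
--         tokenized_list = line.split()
--         for token in tokenized_list:
--             if token not in punctuation:
--                 if token not in word_frequency:
--                     word_frequency[token] = 1
--                 else:
--                     word_frequency[token] += 1
--     for line in data:
--         tokenized_list = line.split()
--         new_line = []
--         for token in tokenized_list:
--             if token in word_frequency: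
--                 if word_frequency[token] <= 0:
--                     new_line.append("UNK")
--                 else:
--                     new_line.append(token)
--
--         unk_replaced_line = ' '.join(new_line)
--         all_data.append(unk_replaced_line)
--
--     return all_data
-- ===== SOURCE B (Python) =====
-- import string
--
--
-- def replace_by_unk(data):
--     punctuation = string.punctuation + "''" + "``" + "--"
--     return [' '.join(tok for tok in line.split() if tok not in punctuation)
--             for line in data]
-- ===== Notes on version B (the rewrite author's own statement) =====
-- stated objective: simpler
-- what changed: A builds a token-frequency dict in a first pass and then filters each line by dict membership (the UNK branch is dead since counts are always >= 1); B drops the dict entirely and filters each line's tokens directly by the substring test against the punctuation string in one pass.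
import Mathlib
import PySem

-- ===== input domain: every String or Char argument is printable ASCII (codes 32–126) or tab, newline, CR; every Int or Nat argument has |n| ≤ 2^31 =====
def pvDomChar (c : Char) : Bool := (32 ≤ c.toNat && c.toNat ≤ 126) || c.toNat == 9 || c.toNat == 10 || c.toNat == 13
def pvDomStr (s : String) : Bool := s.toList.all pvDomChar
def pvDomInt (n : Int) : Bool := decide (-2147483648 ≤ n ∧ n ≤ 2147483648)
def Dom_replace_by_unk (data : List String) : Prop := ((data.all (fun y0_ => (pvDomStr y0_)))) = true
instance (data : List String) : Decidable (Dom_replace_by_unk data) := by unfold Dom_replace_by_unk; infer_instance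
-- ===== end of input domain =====

-- B removes A's frequency dict: the UNK branch is unreachable (every stored count is ≥ 1),
-- so keeping a token is exactly the substring test against the punctuation string.

-- string.punctuation + "''" + "``" + "--"
def pvPunct : String := "!\"#$%&'()*+,-./:;<=>?@[\\]^_`{|}~''``--"

-- ===== PORT A =====
-- inner body of A's first loop: the frequency-dict update for one token
def pvAddTok (wf : PySem.Dict String Int) (token : String) : PySem.Dict String Int :=
  if !(PySem.Str.isIn token pvPunct) then
    if wf.contains token = false then wf.insert token 1
    else wf.insert token (wf.getD token 0 + 1)
  else wf

def replace_by_unk (data : List String) : List String :=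
  let word_frequency : PySem.Dict String Int :=
    data.foldl (fun wf line => (PySem.Str.split₀ line).foldl pvAddTok wf) PySem.Dict.empty
  data.foldl (fun all_data line =>
    let new_line := (PySem.Str.split₀ line).foldl (fun nl token =>
      if word_frequency.contains token then
        if word_frequency.getD token 0 ≤ 0 then nl ++ ["UNK"] else nl ++ [token]
      else nl) []
    all_data ++ [PySem.Str.join " " new_line]) []

-- ===== PORT B =====
def replace_by_unk_alt (data : List String) : List String :=
  data.map (fun line =>
    PySem.Str.join " " ((PySem.Str.split₀ line).filter (fun tok => !(PySem.Str.isIn tok pvPunct))))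

-- ===== PRECONDITION & SPEC =====
def Spec_replace_by_unk (data : List String) (out : List String) : Prop := out = replace_by_unk_alt data
instance (data : List String) (out : List String) : Decidable (Spec_replace_by_unk data out) := by unfold Spec_replace_by_unk; infer_instance

-- ===== CLAIM (what is proved, stated in full; the proofs are below) =====
def Claim_equal_replace_by_unk : Prop := ∀ (data : List String), Dom_replace_by_unk data → Spec_replace_by_unk data (replace_by_unk data)

-- ===== LEMMAS AND PROOFS =====

lemma contains_addTok (d : PySem.Dict String Int) (s t : String) :
    (pvAddTok d s).contains t =
      ((s == t) && !(PySem.Str.isIn t pvPunct) || d.contains t) := by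
  unfold pvAddTok
  by_cases hst : s = t
  · subst hst
    have hb : (s == s) = true := by simp
    rw [hb, Bool.true_and]
    generalize PySem.Str.isIn s pvPunct = q
    cases q
    · rw [if_pos (show (!false) = true from rfl)]
      by_cases hc : d.contains s = false <;>
        [rw [if_pos hc]; rw [if_neg hc]] <;>
        simp [PySem.Dict.contains_insert, hc]
    · rw [if_neg (by simp)]
      simp
  · have hb : (s == t) = false := by simp [hst]
    have hb' : (t == s) = false := by simp [Ne.symm hst]
    rw [hb, Bool.false_and, Bool.false_or]
    generalize PySem.Str.isIn s pvPunct = q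
    cases q
    · rw [if_pos (show (!false) = true from rfl)]
      by_cases hc : d.contains s = false <;>
        [rw [if_pos hc]; rw [if_neg hc]] <;>
        simp [PySem.Dict.contains_insert, hb']
    · rw [if_neg (by simp)]

lemma contains_foldTok (L : List String) (d : PySem.Dict String Int) (t : String) :
    ((L.foldl pvAddTok d).contains t) =
      (decide (t ∈ L) && !(PySem.Str.isIn t pvPunct) || d.contains t) := by
  induction L generalizing d with
  | nil => simp
  | cons x xs ih =>
      simp only [List.foldl_cons, ih, contains_addTok]
      generalize PySem.Str.isIn t pvPunct = q
      by_cases hx : x = t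
      · subst hx
        have hb : (x == x) = true := by simp
        by_cases hm : x ∈ xs <;> cases q <;>
          simp [hm, hb]
      · have hb : (x == t) = false := by simp [hx]
        by_cases hm : t ∈ xs <;> cases q <;>
          simp [hm, hb, Ne.symm hx]

lemma contains_build (data : List String) (t : String) :
    ((data.foldl (fun wf line => (PySem.Str.split₀ line).foldl pvAddTok wf)
        PySem.Dict.empty).contains t) =
      (data.any (fun line => decide (t ∈ PySem.Str.split₀ line)) &&
        !(PySem.Str.isIn t pvPunct)) := by
  suffices h : ∀ (d : PySem.Dict String Int),
      ((data.foldl (fun wf line => (PySem.Str.split₀ line).foldl pvAddTok wf) d).contains t) =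
        (data.any (fun line => decide (t ∈ PySem.Str.split₀ line)) &&
          !(PySem.Str.isIn t pvPunct) || d.contains t) by
    simpa using h PySem.Dict.empty
  induction data with
  | nil => simp
  | cons l ls ih =>
      intro d
      simp only [List.foldl_cons, ih, contains_foldTok, List.any_cons]
      by_cases h1 : t ∈ PySem.Str.split₀ l <;>
        cases h2 : ls.any (fun line => decide (t ∈ PySem.Str.split₀ line)) <;>
          cases hp : PySem.Str.isIn t pvPunct <;> simp [h1, h2, hp]

lemma getD_pos_addTok (d : PySem.Dict String Int) (s : String)
    (h : ∀ t, d.contains t = true → 1 ≤ d.getD t 0) :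
    ∀ t, (pvAddTok d s).contains t = true → 1 ≤ (pvAddTok d s).getD t 0 := by
  intro t ht
  unfold pvAddTok at ht ⊢
  by_cases hp : PySem.Str.isIn s pvPunct = true
  · rw [if_neg (by rw [hp]; simp)] at ht ⊢
    exact h t ht
  · have hp' : PySem.Str.isIn s pvPunct = false := by revert hp; cases PySem.Str.isIn s pvPunct <;> simp
    rw [if_pos (by rw [hp']; rfl)] at ht ⊢
    by_cases hts : t = s
    · subst hts
      by_cases hc : d.contains t = false
      · rw [if_pos hc] at ht ⊢; rw [PySem.Dict.getD_insert_self]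
      · rw [if_neg hc] at ht ⊢
        rw [PySem.Dict.getD_insert_self]
        have h1 := h t (by revert hc; cases d.contains t <;> simp)
        omega
    · by_cases hc : d.contains s = false
      · rw [if_pos hc] at ht ⊢
        rw [PySem.Dict.getD_insert_of_ne d _ _ hts]
        rw [PySem.Dict.contains_insert] at ht
        rw [show (t == s) = false by simp [hts], Bool.false_or] at ht
        exact h t ht
      · rw [if_neg hc] at ht ⊢
        rw [PySem.Dict.getD_insert_of_ne d _ _ hts]
        rw [PySem.Dict.contains_insert] at ht
        rw [show (t == s) = false by simp [hts], Bool.false_or] at ht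
        exact h t ht

lemma getD_pos_foldTok (L : List String) (d : PySem.Dict String Int)
    (h : ∀ t, d.contains t = true → 1 ≤ d.getD t 0) :
    ∀ t, (L.foldl pvAddTok d).contains t = true → 1 ≤ (L.foldl pvAddTok d).getD t 0 := by
  induction L generalizing d with
  | nil => simpa using h
  | cons x xs ih => exact fun t ht => ih (pvAddTok d x) (getD_pos_addTok d x h) t ht

lemma getD_pos_build (data : List String) :
    ∀ t, ((data.foldl (fun wf line => (PySem.Str.split₀ line).foldl pvAddTok wf)
        PySem.Dict.empty).contains t) = true →
      1 ≤ (data.foldl (fun wf line => (PySem.Str.split₀ line).foldl pvAddTok wf)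
        PySem.Dict.empty).getD t 0 := by
  suffices h : ∀ (d : PySem.Dict String Int),
      (∀ t, d.contains t = true → 1 ≤ d.getD t 0) →
      ∀ t, ((data.foldl (fun wf line => (PySem.Str.split₀ line).foldl pvAddTok wf) d).contains t) = true →
        1 ≤ (data.foldl (fun wf line => (PySem.Str.split₀ line).foldl pvAddTok wf) d).getD t 0 by
    exact h PySem.Dict.empty (by simp)
  induction data with
  | nil => intro d hd; simpa using hd
  | cons l ls ih =>
      intro d hd
      exact ih _ (getD_pos_foldTok (PySem.Str.split₀ l) d hd)

-- ===== VERDICT (by name: the statement is the Claim_ definition above) =====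
theorem replace_by_unk_spec : Claim_equal_replace_by_unk := by
  intro data _
  unfold Spec_replace_by_unk replace_by_unk replace_by_unk_alt
  set wf := data.foldl (fun wf line => (PySem.Str.split₀ line).foldl pvAddTok wf)
      PySem.Dict.empty with hwf
  have hline : ∀ line ∈ data,
      (PySem.Str.split₀ line).foldl (fun nl token =>
        if wf.contains token then
          if wf.getD token 0 ≤ 0 then nl ++ ["UNK"] else nl ++ [token]
        else nl) [] =
      (PySem.Str.split₀ line).filter (fun tok => !(PySem.Str.isIn tok pvPunct)) := by
    intro line hl
    have hcongr : ∀ (nl : List String), ∀ token ∈ PySem.Str.split₀ line,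
        (if wf.contains token then
          if wf.getD token 0 ≤ 0 then nl ++ ["UNK"] else nl ++ [token]
        else nl) =
        (if !(PySem.Str.isIn token pvPunct) then nl ++ [token] else nl) := by
      intro nl token htok
      have hc := contains_build data token
      rw [← hwf] at hc
      cases hp : PySem.Str.isIn token pvPunct
      · have hany : data.any (fun l => decide (token ∈ PySem.Str.split₀ l)) = true :=
          List.any_eq_true.mpr ⟨line, hl, by simpa using htok⟩
        have hct : wf.contains token = true := by rw [hc, hany, hp]; rfl
        have hpos := getD_pos_build data token (by rw [← hwf]; exact hct)
        rw [← hwf] at hpos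
        rw [if_pos hct, if_neg (by omega), if_pos (by simp [hp])]
      · have hct : wf.contains token = false := by rw [hc, hp]; simp
        simp [hct, hp]
    calc (PySem.Str.split₀ line).foldl (fun nl token =>
          if wf.contains token then
            if wf.getD token 0 ≤ 0 then nl ++ ["UNK"] else nl ++ [token]
          else nl) []
        = (PySem.Str.split₀ line).foldl (fun nl token =>
            if !(PySem.Str.isIn token pvPunct) then nl ++ [token] else nl) [] :=
          PySem.List.foldl_congr_mem _ _ _ _ (fun nl token ht => hcongr nl token ht)
      _ = (PySem.Str.split₀ line).filter (fun tok => !(PySem.Str.isIn tok pvPunct)) := by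
          simpa using PySem.List.foldl_append_if_eq_filter
            (fun tok => !(PySem.Str.isIn tok pvPunct)) (PySem.Str.split₀ line) []
  calc data.foldl (fun all_data line =>
        all_data ++ [PySem.Str.join " " ((PySem.Str.split₀ line).foldl (fun nl token =>
          if wf.contains token then
            if wf.getD token 0 ≤ 0 then nl ++ ["UNK"] else nl ++ [token]
          else nl) [])]) []
      = data.foldl (fun all_data line =>
          all_data ++ [PySem.Str.join " "
            ((PySem.Str.split₀ line).filter (fun tok => !(PySem.Str.isIn tok pvPunct)))]) [] :=
        PySem.List.foldl_congr_mem _ _ _ _ (fun acc line hl => by rw [hline line hl])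
    _ = data.map (fun line => PySem.Str.join " "
          ((PySem.Str.split₀ line).filter (fun tok => !(PySem.Str.isIn tok pvPunct)))) := by
        simpa using PySem.List.foldl_append_singleton_eq_map
          (f := fun line => PySem.Str.join " "
            ((PySem.Str.split₀ line).filter (fun tok => !(PySem.Str.isIn tok pvPunct))))
          (l := data) (acc := [])
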